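-- pv_equiv track=rewrite | github.com/xngip/he_thong_cham_thi_trac_nghiem | omr-backend/cluster.py | split_rows_by_cluster
-- ===== SOURCE A (Python) =====
-- def split_rows_by_cluster(coords, max_gap=25):
--     if not coords:
--         return []
--     coords = sorted(coords, key=lambda c: c[1])
--     rows = [[coords[0]]]
--     for i in range(1, len(coords)):
--         if abs(coords[i][1] - coords[i-1][1]) <= max_gap:
--             rows[-1].append(coords[i])
--         else:
--             rows.append([coords[i]])
--     return rows
-- ===== SOURCE B (Python) =====
-- def split_rows_by_cluster(coords, max_gap=25):
--     if not coords:
--         return []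
--     s = sorted(coords, key=lambda c: c[1])
--     breaks = [i for i, (prev, cur) in enumerate(zip(s, s[1:]), 1)
--               if abs(cur[1] - prev[1]) > max_gap]
--     bounds = [0] + breaks + [len(s)]
--     return [s[a:b] for a, b in zip(bounds, bounds[1:])]
-- ===== Notes on version B (the rewrite author's own statement) =====
-- stated objective: alternative
-- what changed: A grows rows in a single stateful pass (append to rows[-1] or start a new row); B instead works in stages: it first materializes the list of break indices from the adjacent-pair gaps of the sorted list, then derives boundary pairs and partitions the sorted list by slicing between consecutive boundaries.
import Mathlib
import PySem

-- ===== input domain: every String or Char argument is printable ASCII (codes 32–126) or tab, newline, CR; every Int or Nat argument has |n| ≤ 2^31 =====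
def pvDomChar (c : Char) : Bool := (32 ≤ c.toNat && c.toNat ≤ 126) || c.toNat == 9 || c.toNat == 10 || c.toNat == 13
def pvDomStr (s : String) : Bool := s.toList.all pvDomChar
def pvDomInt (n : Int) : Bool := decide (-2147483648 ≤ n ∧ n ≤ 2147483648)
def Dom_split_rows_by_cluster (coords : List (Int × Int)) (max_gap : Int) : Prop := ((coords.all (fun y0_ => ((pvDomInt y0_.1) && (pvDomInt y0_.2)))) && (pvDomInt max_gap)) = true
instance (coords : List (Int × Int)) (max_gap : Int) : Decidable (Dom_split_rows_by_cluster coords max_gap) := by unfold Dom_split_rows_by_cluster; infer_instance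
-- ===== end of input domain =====

-- B replaces A's stateful grow-or-start loop by a staged partition: first compute the
-- list of break indices from adjacent-pair gaps of the sorted list, then slice the
-- sorted list between consecutive boundaries (objective: alternative, same cost).


-- ===== PORT A =====
-- A's 'for i in range(1, len(coords))' as the obvious structural recursion over the sorted
-- tail, carrying prev = coords[i-1]; rows[-1].append(c) is rows.dropLast ++ [last ++ [c]].
def ALoop (max_gap : Int) (prev : Int × Int) (rest : List (Int × Int))
    (rows : List (List (Int × Int))) : List (List (Int × Int)) :=
  match rest with
  | [] => rows
  | c :: xs =>
    if |c.2 - prev.2| ≤ max_gap then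
      ALoop max_gap c xs (rows.dropLast ++ [rows.getLastD [] ++ [c]])
    else
      ALoop max_gap c xs (rows ++ [[c]])

def split_rows_by_cluster (coords : List (Int × Int)) (max_gap : Int) : List (List (Int × Int)) :=
  if coords = [] then []
  else
    match PySem.List.sorted coords (fun c => c.2) false with
    | [] => []
    | x :: xs => ALoop max_gap x xs [[x]]

-- ===== PORT B =====
-- Source B stage by stage: sorted list s; breaks = the enumerate(zip(s, s[1:]), 1)
-- comprehension; bounds = [0] + breaks + [len(s)]; rows = slices between consecutive bounds.
def split_rows_by_cluster_alt (coords : List (Int × Int)) (max_gap : Int) : List (List (Int × Int)) :=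
  if coords = [] then []
  else
    let s := PySem.List.sorted coords (fun c => c.2) false
    let breaks := ((PySem.List.enumerate (s.zip (PySem.List.slice s (some 1) none)) 1).filter
        (fun p => !decide (|p.2.2.2 - p.2.1.2| ≤ max_gap))).map (fun p => p.1)
    let bounds := (0 : Int) :: (breaks ++ [(s.length : Int)])
    (bounds.zip bounds.tail).map (fun ab => PySem.List.slice s (some ab.1) (some ab.2))

-- ===== PRECONDITION & SPEC =====
def Spec_split_rows_by_cluster (coords : List (Int × Int)) (max_gap : Int) (out : List (List (Int × Int))) : Prop := out = split_rows_by_cluster_alt coords max_gap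
instance (coords : List (Int × Int)) (max_gap : Int) (out : List (List (Int × Int))) : Decidable (Spec_split_rows_by_cluster coords max_gap out) := by unfold Spec_split_rows_by_cluster; infer_instance

-- ===== CLAIM (what is proved, stated in full; the proofs are below) =====
def Claim_equal_split_rows_by_cluster : Prop := ∀ (coords : List (Int × Int)) (max_gap : Int), Dom_split_rows_by_cluster coords max_gap → Spec_split_rows_by_cluster coords max_gap (split_rows_by_cluster coords max_gap)

-- ===== LEMMAS AND PROOFS =====

-- Proof-side canonical form: one maximal run of small y-gaps.
def takeRun (max_gap : Int) (prev : Int × Int) (xs : List (Int × Int)) :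
    List (Int × Int) × List (Int × Int) :=
  match xs with
  | [] => ([], [])
  | c :: rest =>
    if |c.2 - prev.2| ≤ max_gap then
      ((takeRun max_gap c rest).1.cons c, (takeRun max_gap c rest).2)
    else
      ([], c :: rest)

theorem takeRun_snd_length_le (max_gap : Int) (prev : Int × Int) (xs : List (Int × Int)) :
    (takeRun max_gap prev xs).2.length ≤ xs.length := by
  induction xs generalizing prev with
  | nil => simp [takeRun]
  | cons c rest ih =>
    simp only [takeRun]
    split
    · exact Nat.le_succ_of_le (ih c)
    · simp

theorem takeRun_append (max_gap : Int) (prev : Int × Int) (xs : List (Int × Int)) :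
    (takeRun max_gap prev xs).1 ++ (takeRun max_gap prev xs).2 = xs := by
  induction xs generalizing prev with
  | nil => simp [takeRun]
  | cons c rest ih =>
    simp only [takeRun]
    split
    · simpa using ih c
    · simp

-- canonical: rows are maximal runs
def BOuter (max_gap : Int) (s : List (Int × Int)) : List (List (Int × Int)) :=
  match s with
  | [] => []
  | c :: xs => (c :: (takeRun max_gap c xs).1) :: BOuter max_gap (takeRun max_gap c xs).2
termination_by s.length
decreasing_by
  exact Nat.lt_succ_of_le (takeRun_snd_length_le max_gap c xs)

-- Invariant of A's loop: with accumulator rows ++ [r] (r the open last row), the loop extends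
-- r by the current maximal run and then produces exactly the canonical rows on the remainder.
theorem ALoop_eq (max_gap : Int) (xs : List (Int × Int)) :
    ∀ (prev : Int × Int) (rows : List (List (Int × Int))) (r : List (Int × Int)),
    ALoop max_gap prev xs (rows ++ [r]) =
      rows ++ (r ++ (takeRun max_gap prev xs).1) :: BOuter max_gap (takeRun max_gap prev xs).2 := by
  induction xs with
  | nil => intro prev rows r; simp [ALoop, takeRun, BOuter]
  | cons c xs ih =>
    intro prev rows r
    simp only [ALoop, takeRun]
    split
    · rw [List.dropLast_concat, List.getLastD_concat, ih c rows (r ++ [c])]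
      simp
    · rw [show rows ++ [r] ++ [[c]] = (rows ++ [r]) ++ [[c]] by simp, ih c (rows ++ [r]) [c]]
      rw [BOuter]
      simp

-- B's break-index comprehension, as a function of the sorted list's head and tail.
def gBrk (max_gap : Int) (prev : Int × Int) (xs : List (Int × Int)) (n : Int) : List Int :=
  ((PySem.List.enumerate ((prev :: xs).zip xs) n).filter
    (fun p => !decide (|p.2.2.2 - p.2.1.2| ≤ max_gap))).map (fun p => p.1)

theorem gBrk_nil (max_gap : Int) (prev : Int × Int) (n : Int) :
    gBrk max_gap prev [] n = [] := by
  simp [gBrk]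

theorem gBrk_cons (max_gap : Int) (prev c : Int × Int) (cs : List (Int × Int)) (n : Int) :
    gBrk max_gap prev (c :: cs) n =
      if |c.2 - prev.2| ≤ max_gap then gBrk max_gap c cs (n + 1)
      else n :: gBrk max_gap c cs (n + 1) := by
  by_cases h : |c.2 - prev.2| ≤ max_gap <;>
    simp [gBrk, List.zip_cons_cons, PySem.List.enumerate_cons, h]

-- breaks = position of the end of the first maximal run, then the breaks of the remainder.
theorem gBrk_takeRun (max_gap : Int) (xs : List (Int × Int)) :
    ∀ (prev : Int × Int) (n : Int),
    gBrk max_gap prev xs n =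
      (match (takeRun max_gap prev xs).2 with
       | [] => []
       | r :: rs =>
         (n + ((takeRun max_gap prev xs).1.length : Int)) ::
           gBrk max_gap r rs (n + ((takeRun max_gap prev xs).1.length : Int) + 1)) := by
  induction xs with
  | nil => intro prev n; simp [gBrk_nil, takeRun]
  | cons c cs ih =>
    intro prev n
    rw [gBrk_cons]
    simp only [takeRun]
    split_ifs with h
    · simp only [ih c (n + 1)]
      cases h2 : (takeRun max_gap c cs).2 with
      | nil => simp
      | cons r rs =>
        simp only [List.length_cons]
        congr 1
        · push_cast; ring
        · congr 1; push_cast; ring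
    · simp

-- the slicing stage, as a function of the boundary list
def rowSlices (s : List (Int × Int)) (bs : List Int) : List (List (Int × Int)) :=
  (bs.zip bs.tail).map (fun ab => PySem.List.slice s (some ab.1) (some ab.2))

theorem rowSlices_singleton (s : List (Int × Int)) (a : Int) : rowSlices s [a] = [] := by
  simp [rowSlices]

theorem rowSlices_cons (s : List (Int × Int)) (a b : Int) (bs : List Int) :
    rowSlices s (a :: b :: bs) = PySem.List.slice s (some a) (some b) :: rowSlices s (b :: bs) := by
  simp [rowSlices]

theorem slice_append_full (front rest : List (Int × Int)) :
    PySem.List.slice (front ++ rest) (some (front.length : Int))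
      (some ((front ++ rest).length : Int)) = rest := by
  rw [PySem.List.slice_natCast]
  simp

theorem slice_append_take (front rest : List (Int × Int)) (k : Nat) :
    PySem.List.slice (front ++ rest) (some (front.length : Int))
      (some ((front.length : Int) + (k : Int))) = rest.take k := by
  have : ((front.length : Int) + (k : Int)) = (((front.length + k : Nat)) : Int) := by push_cast; ring
  rw [this, PySem.List.slice_natCast]
  simp

-- Main induction: slicing between the boundaries of the rest region yields the canonical rows.
theorem rowSlices_eq (max_gap : Int) :
    ∀ (N : Nat) (t : List (Int × Int)), t.length ≤ N → ∀ (r : Int × Int) (front : List (Int × Int)),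
    rowSlices (front ++ r :: t)
      ((front.length : Int) :: (gBrk max_gap r t ((front.length : Int) + 1) ++ [((front ++ r :: t).length : Int)]))
      = BOuter max_gap (r :: t) := by
  intro N
  induction N with
  | zero =>
    intro t ht r front
    interval_cases h : t.length
    rw [List.length_eq_zero_iff] at h
    subst h
    rw [gBrk_nil]
    simp only [List.nil_append, rowSlices_cons, rowSlices_singleton, slice_append_full]
    rw [BOuter]
    simp [takeRun, BOuter]
  | succ N ih =>
    intro t ht r front
    rw [gBrk_takeRun]
    cases h2 : (takeRun max_gap r t).2 with
    | nil =>
      have hrun : (takeRun max_gap r t).1 = t := by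
        have := takeRun_append max_gap r t; rw [h2] at this; simpa using this
      simp only [List.nil_append, rowSlices_cons, rowSlices_singleton, slice_append_full]
      rw [BOuter]
      simp [h2, hrun, BOuter]
    | cons q qs =>
      have hsplit : t = (takeRun max_gap r t).1 ++ q :: qs := by
        rw [← h2, takeRun_append]
      set run := (takeRun max_gap r t).1 with hrun
      simp only [List.cons_append, rowSlices_cons]
      have hb : (front.length : Int) + 1 + (run.length : Int)
          = (front.length : Int) + (((run.length + 1 : Nat)) : Int) := by push_cast; ring
      have hfirst : PySem.List.slice (front ++ r :: t) (some (front.length : Int))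
          (some ((front.length : Int) + 1 + (run.length : Int))) = r :: run := by
        rw [hb, slice_append_take, hsplit]
        simp
      have hfront' : ((front ++ r :: run).length : Int)
          = (front.length : Int) + 1 + (run.length : Int) := by
        push_cast [List.length_append, List.length_cons]; ring
      have hs : front ++ r :: t = (front ++ r :: run) ++ q :: qs := by rw [hsplit]; simp
      have hqs : qs.length ≤ N := by
        have ho : t.length = run.length + 1 + qs.length := by
          rw [hsplit]; simp [List.length_append]; omega
        omega
      have hih := ih qs hqs q (front ++ r :: run)
      rw [← hs, hfront'] at hih
      rw [hfirst, hih]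
      conv_rhs => rw [BOuter]
      rw [h2, ← hrun]

-- head case: the first boundary is 0
theorem B_eq_BOuter (max_gap : Int) (x : Int × Int) (xs : List (Int × Int)) :
    rowSlices (x :: xs) (0 :: (gBrk max_gap x xs 1 ++ [((x :: xs).length : Int)]))
      = BOuter max_gap (x :: xs) := by
  rw [gBrk_takeRun]
  cases h2 : (takeRun max_gap x xs).2 with
  | nil =>
    have hrun : (takeRun max_gap x xs).1 = xs := by
      have := takeRun_append max_gap x xs; rw [h2] at this; simpa using this
    simp only [List.nil_append, rowSlices_cons, rowSlices_singleton]
    have hfull : PySem.List.slice (x :: xs) (some 0) (some ((x :: xs).length : Int)) = x :: xs := by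
      rw [PySem.List.slice_zero_start, PySem.List.slice_to_natCast]; simp
    rw [hfull]
    conv_rhs => rw [BOuter]
    rw [h2, hrun, BOuter]
  | cons q qs =>
    have hsplit : xs = (takeRun max_gap x xs).1 ++ q :: qs := by
      rw [← h2, takeRun_append]
    set run := (takeRun max_gap x xs).1 with hrun
    simp only [List.cons_append, rowSlices_cons]
    have hfirst : PySem.List.slice (x :: xs) (some 0) (some (1 + (run.length : Int))) = x :: run := by
      rw [show (1 + (run.length : Int)) = ((run.length + 1 : Nat) : Int) by push_cast; ring,
        PySem.List.slice_zero_start, PySem.List.slice_to_natCast, hsplit]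
      simp
    have hfront' : ((x :: run).length : Int) = 1 + (run.length : Int) := by push_cast [List.length_cons]; ring
    have hs : x :: xs = (x :: run) ++ q :: qs := by rw [hsplit]; simp
    have hih := rowSlices_eq max_gap qs.length qs le_rfl q (x :: run)
    rw [← hs, hfront'] at hih
    rw [hfirst, hih]
    conv_rhs => rw [BOuter]
    rw [h2, ← hrun]

-- ===== VERDICT (by name: the statement is the Claim_ definition above) =====
theorem split_rows_by_cluster_spec : Claim_equal_split_rows_by_cluster := by
  intro coords max_gap _
  unfold Spec_split_rows_by_cluster split_rows_by_cluster split_rows_by_cluster_alt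
  by_cases h : coords = []
  · simp [h]
  · simp only [if_neg h]
    cases hs : PySem.List.sorted coords (fun c => c.2) false with
    | nil =>
      exfalso
      apply h
      have hlen := congrArg List.length hs
      rw [PySem.List.length_sorted] at hlen
      exact List.length_eq_zero_iff.mp hlen
    | cons x xs =>
      show ALoop max_gap x xs [[x]] = _
      -- A side via the loop invariant
      rw [show ALoop max_gap x xs [[x]] = ALoop max_gap x xs ([] ++ [[x]]) by simp,
        ALoop_eq max_gap xs x [] [x]]
      -- B side: identify the comprehension with gBrk and the slicing with rowSlices
      rw [show PySem.List.slice (x :: xs) (some 1) none = xs by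
        rw [PySem.List.slice_from_one]; rfl]
      rw [show (((0 : Int) :: ((((PySem.List.enumerate ((x :: xs).zip xs) 1).filter
            (fun p => !decide (|p.2.2.2 - p.2.1.2| ≤ max_gap))).map (fun p => p.1))
              ++ [((x :: xs).length : Int)])).zip
            ((0 : Int) :: ((((PySem.List.enumerate ((x :: xs).zip xs) 1).filter
            (fun p => !decide (|p.2.2.2 - p.2.1.2| ≤ max_gap))).map (fun p => p.1))
              ++ [((x :: xs).length : Int)])).tail).map
            (fun ab => PySem.List.slice (x :: xs) (some ab.1) (some ab.2))
          = rowSlices (x :: xs) (0 :: (gBrk max_gap x xs 1 ++ [((x :: xs).length : Int)])) from rfl]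
      rw [B_eq_BOuter]
      conv_rhs => rw [BOuter]
      simp
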